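-- pv_equiv track=rewrite | github.com/h4wks123/CPU-Scheduler | i/o management/look.py | look_scheduling_algorithm
-- ===== SOURCE A (Python) =====
-- def look_scheduling_algorithm(current_position, requests):
--     temp = sorted(requests)
--     sorted_requests = []
--
--     # Find the index of current_position in the sorted list
--     index_current_position = temp.index(current_position)
--
--     # Scan from current_position to the end
--     for i in range(index_current_position, len(temp)):
--         sorted_requests.append(temp[i])
--
--     # Scan from the beginning to current_position - 1 in reverse order
--     for i in range(index_current_position - 1, -1, -1):
--         sorted_requests.append(temp[i])
--
--     return sorted_requests
-- ===== SOURCE B (Python) =====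
-- def look_scheduling_algorithm(current_position, requests):
--     # Same contract as the original: the head must be among the pending requests.
--     if current_position not in requests:
--         raise ValueError(f"{current_position} is not in list")
--     # LOOK order as ONE stable sort with a composite key: requests at or past the
--     # head come first, ascending by value (flag False); requests below the head
--     # follow, ordered by distance below the head, i.e. descending by value.
--     # No index lookup, no slicing, no list reversal, no concatenation.
--     def look_key(r):
--         below = r < current_position
--         return (below, current_position - r if below else r)
--     return sorted(requests, key=look_key)
-- ===== Notes on version B (the rewrite author's own statement) =====
-- stated objective: simpler
-- what changed: Replaces sort + .index + two index-driven scans (forward slice, then reversed prefix) by a single sort under a composite key (below-head flag, then value or distance below head), so the LOOK order falls out of one sort call with no index arithmetic, reversal or concatenation.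
import Mathlib
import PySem

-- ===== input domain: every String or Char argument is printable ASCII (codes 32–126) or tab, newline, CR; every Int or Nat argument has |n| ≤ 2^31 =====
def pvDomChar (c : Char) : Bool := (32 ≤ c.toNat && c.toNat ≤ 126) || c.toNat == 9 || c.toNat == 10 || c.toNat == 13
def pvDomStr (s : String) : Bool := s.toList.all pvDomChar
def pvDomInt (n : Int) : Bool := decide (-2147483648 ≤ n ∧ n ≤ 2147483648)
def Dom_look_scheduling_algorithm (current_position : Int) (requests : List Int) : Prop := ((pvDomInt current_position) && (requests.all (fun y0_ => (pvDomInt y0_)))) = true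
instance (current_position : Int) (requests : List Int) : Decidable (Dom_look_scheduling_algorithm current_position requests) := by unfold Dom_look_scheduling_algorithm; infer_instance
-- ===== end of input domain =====

-- B replaces A's sort + index lookup + two index-driven scans by a single stable
-- sort under a composite key (below-head flag, then value or distance below head).

-- ===== PORT A =====
-- temp.index raises ValueError when current_position is absent: index? = none there,
-- excluded by Pre_; the [] branch is unreachable under Pre_.
def look_scheduling_algorithm (current_position : Int) (requests : List Int) : List Int :=
  let temp := PySem.List.sorted requests (fun x => x) false
  match PySem.List.index? temp current_position with
  | none => []
  | some idx =>
    let s1 := (PySem.List.pyRange (idx : Int) (temp.length : Int) 1).foldl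
      (fun acc i => acc ++ [PySem.List.pyGetD temp i 0]) []
    (PySem.List.pyRange ((idx : Int) - 1) (-1) (-1)).foldl
      (fun acc i => acc ++ [PySem.List.pyGetD temp i 0]) s1

-- ===== PORT B =====
-- Source B's look_key r = (r < cp, cp - r if r < cp else r): the tuple key is ported
-- with PySem.List.sorted2 (k1 = the Bool flag, k2 = the Int component); Source B's
-- 'raise ValueError' branch (head absent) is outside Pre_ and ported as [].
def look_scheduling_algorithm_alt (current_position : Int) (requests : List Int) : List Int :=
  if current_position ∈ requests then
    PySem.List.sorted2 requests
      (fun r => decide (r < current_position))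
      (fun r => if r < current_position then current_position - r else r) false
  else []

-- ===== PRECONDITION & SPEC =====
-- Pre_ excludes exactly the inputs where A's temp.index raises ValueError.
def Pre_look_scheduling_algorithm (current_position : Int) (requests : List Int) : Prop :=
  current_position ∈ requests
instance (current_position : Int) (requests : List Int) : Decidable (Pre_look_scheduling_algorithm current_position requests) := by unfold Pre_look_scheduling_algorithm; infer_instance

def pvWitness_look_scheduling_algorithm : Int × List Int := (2, [1, 2, 3])

def Spec_look_scheduling_algorithm (current_position : Int) (requests : List Int) (out : List Int) : Prop := out = look_scheduling_algorithm_alt current_position requests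
instance (current_position : Int) (requests : List Int) (out : List Int) : Decidable (Spec_look_scheduling_algorithm current_position requests out) := by unfold Spec_look_scheduling_algorithm; infer_instance

-- ===== CLAIM (what is proved, stated in full; the proofs are below) =====
def Claim_equal_look_scheduling_algorithm : Prop := ∀ (current_position : Int) (requests : List Int), Dom_look_scheduling_algorithm current_position requests → Pre_look_scheduling_algorithm current_position requests → Spec_look_scheduling_algorithm current_position requests (look_scheduling_algorithm current_position requests)

-- ===== LEMMAS AND PROOFS =====

-- B's comparator: the strict lexicographic order on (below-head flag, Int component).
def pvLookLt (cp : Int) (a b : Int) : Bool :=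
  decide ((decide (a < cp) : Bool) < (decide (b < cp) : Bool)) ||
    (!decide ((decide (b < cp) : Bool) < (decide (a < cp) : Bool)) &&
      decide ((if a < cp then cp - a else a) < (if b < cp then cp - b else b)))

theorem pvLookLt_trans (cp a b c : Int) (h1 : pvLookLt cp a b = true)
    (h2 : pvLookLt cp b c = true) : pvLookLt cp a c = true := by
  unfold pvLookLt at *
  by_cases ha : a < cp <;> by_cases hb : b < cp <;> by_cases hc : c < cp <;>
    simp [ha, hb, hc, Bool.lt_iff] at h1 h2 ⊢ <;> omega

theorem pvLookLt_antisymm (cp a b : Int) (h1 : pvLookLt cp b a = false)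
    (h2 : pvLookLt cp a b = false) : a = b := by
  unfold pvLookLt at *
  by_cases ha : a < cp <;> by_cases hb : b < cp <;> simp_all <;> omega

-- insertion with the comparator preserves the sortedness invariant
theorem pv_insertBy_pairwise (cp : Int) (x : Int) (acc : List Int)
    (h : acc.Pairwise (fun a b => pvLookLt cp b a = false)) :
    (PySem.List.insertBy (pvLookLt cp) x acc).Pairwise (fun a b => pvLookLt cp b a = false) := by
  induction acc with
  | nil =>
      simp [PySem.List.insertBy]
  | cons y ys ih =>
      rcases List.pairwise_cons.mp h with ⟨hy, hys⟩
      by_cases hxy : pvLookLt cp x y = true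
      · simp only [PySem.List.insertBy, hxy, if_true]
        refine List.pairwise_cons.mpr ⟨?_, h⟩
        intro z hz
        rcases List.mem_cons.mp hz with rfl | hz'
        · -- ¬ lt y x from lt x y (asymmetry via antisymm/trans)
          by_contra hyx
          have hyx' : pvLookLt cp z x = true := by
            cases hh : pvLookLt cp z x
            · exact absurd hh hyx
            · rfl
          have := pvLookLt_trans cp x z x hxy hyx'
          -- lt x x = true is impossible
          unfold pvLookLt at this
          by_cases hx : x < cp <;> simp_all
        · -- z ∈ ys: lt z y = false, lt x y = true ⇒ lt z x = false
          cases hh : pvLookLt cp z x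
          · rfl
          · have := pvLookLt_trans cp z x y hh hxy
            rw [hy z hz'] at this
            exact this.symm
      · have hxy' : pvLookLt cp x y = false := by
          cases hh : pvLookLt cp x y
          · rfl
          · exact absurd hh hxy
        simp only [PySem.List.insertBy, hxy]
        refine List.pairwise_cons.mpr ⟨?_, ih hys⟩
        intro z hz
        rcases (PySem.List.mem_insertBy (pvLookLt cp) x z ys).mp hz with rfl | hz'
        · exact hxy'
        · exact hy z hz'

theorem pv_foldl_insertBy_pairwise (cp : Int) :
    ∀ (xs acc : List Int), acc.Pairwise (fun a b => pvLookLt cp b a = false) →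
      (xs.foldl (fun acc x => PySem.List.insertBy (pvLookLt cp) x acc) acc).Pairwise
        (fun a b => pvLookLt cp b a = false) := by
  intro xs
  induction xs with
  | nil => intro acc h; exact h
  | cons x xs ih =>
      intro acc h
      exact ih _ (pv_insertBy_pairwise cp x acc h)

-- B's port is the insertBy fold, and its result is sorted for pvLookLt
theorem pv_alt_eq_fold (cp : Int) (reqs : List Int) (hmem : cp ∈ reqs) :
    look_scheduling_algorithm_alt cp reqs
      = reqs.foldl (fun acc x => PySem.List.insertBy (pvLookLt cp) x acc) [] := by
  unfold look_scheduling_algorithm_alt pvLookLt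
  rw [if_pos hmem]
  simp [PySem.List.sorted2]

theorem pv_alt_pairwise (cp : Int) (reqs : List Int) (hmem : cp ∈ reqs) :
    (look_scheduling_algorithm_alt cp reqs).Pairwise (fun a b => pvLookLt cp b a = false) := by
  rw [pv_alt_eq_fold cp reqs hmem]
  exact pv_foldl_insertBy_pairwise cp reqs [] (List.Pairwise.nil)

-- temp[j], …, temp[j+k-1] read off by index is the slice (drop j).take k.
theorem pv_map_pyGetD_range (t : List Int) (j k : Nat) (h : j + k ≤ t.length) :
    (PySem.List.pyRange (j : Int) ((j + k : Nat) : Int) 1).map (fun i => PySem.List.pyGetD t i 0)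
      = (t.drop j).take k := by
  induction k generalizing j with
  | zero =>
      rw [PySem.List.pyRange_one_eq_nil (by omega)]
      simp
  | succ k ih =>
      rw [PySem.List.pyRange_one_cons (by push_cast; omega)]
      have hj : j < t.length := by omega
      have h1 : ((j : Int) + 1) = ((j + 1 : Nat) : Int) := by push_cast; ring
      have h2 : ((j + (k + 1) : Nat) : Int) = ((j + 1 + k : Nat) : Int) := by push_cast; ring
      rw [List.map_cons, h1, h2, ih (j + 1) (by omega)]
      have : PySem.List.pyGetD t (j : Int) 0 = t[j] := by
        rw [PySem.List.pyGetD_natCast]; exact List.getD_eq_getElem t 0 hj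
      rw [this, List.drop_eq_getElem_cons hj, List.take_succ_cons]

-- In a sorted list containing v at first index idx, drop idx is the ≥-v part and
-- take idx the <-v part.
theorem pv_sorted_split (v : Int) :
    ∀ (t : List Int) (idx : Nat), t.Pairwise (· ≤ ·) →
      PySem.List.index? t v = some idx →
      t.drop idx = t.filter (fun r => decide (v ≤ r)) ∧
      t.take idx = t.filter (fun r => decide (r < v)) := by
  intro t
  induction t with
  | nil => intro idx _ h; simp [PySem.List.index?] at h
  | cons a t ih =>
      intro idx hp hidx
      rcases List.pairwise_cons.mp hp with ⟨ha, hpt⟩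
      by_cases hav : a = v
      · subst hav
        rw [PySem.List.index?_cons_self] at hidx
        cases hidx
        constructor
        · simp only [List.drop_zero, List.filter_cons]
          rw [List.filter_eq_self.mpr (fun x hx => by simpa using ha x hx)]
          simp
        · simp only [List.take_zero, List.filter_cons]
          rw [List.filter_eq_nil_iff.mpr (fun x hx => by simpa using not_lt.mpr (ha x hx))]
          simp
      · rw [PySem.List.index?_cons_of_ne t hav] at hidx
        rcases Option.map_eq_some_iff.mp hidx with ⟨k, hk, rfl⟩
        have hv : v ∈ t := (PySem.List.index?_isSome_iff t v).mp (Option.isSome_iff_exists.mpr ⟨k, hk⟩)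
        have halt : a < v := lt_of_le_of_ne (ha v hv) hav
        rcases ih k hpt hk with ⟨h1, h2⟩
        constructor
        · simpa [List.filter_cons, not_le.mpr halt] using h1
        · simpa [List.filter_cons, halt] using h2

-- A's output is the ≥-head part of the sorted list followed by the reversed <-head part.
theorem pv_A_eq_split (cp : Int) (reqs : List Int) (hmem : cp ∈ reqs) :
    look_scheduling_algorithm cp reqs
      = (PySem.List.sorted reqs (fun x => x) false).filter (fun r => decide (cp ≤ r))
        ++ ((PySem.List.sorted reqs (fun x => x) false).filter (fun r => decide (r < cp))).reverse := by
  unfold look_scheduling_algorithm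
  set t := PySem.List.sorted reqs (fun x => x) false with ht
  have hmt : cp ∈ t := (PySem.List.mem_sorted reqs (fun x => x) false cp).mpr hmem
  obtain ⟨idx, hidx⟩ := Option.isSome_iff_exists.mp ((PySem.List.index?_isSome_iff t cp).mpr hmt)
  simp only [hidx]
  have hlt : idx < t.length := (PySem.List.getElem_of_index?_eq_some hidx).1
  have hpw : t.Pairwise (· ≤ ·) := by
    simpa using PySem.List.sorted_pairwise reqs (fun x => x)
  obtain ⟨hdrop, htake⟩ := pv_sorted_split cp t idx hpw hidx
  have l1 : (PySem.List.pyRange (idx : Int) (t.length : Int) 1).foldl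
      (fun acc i => acc ++ [PySem.List.pyGetD t i 0]) [] = t.drop idx := by
    rw [PySem.List.foldl_append_singleton_eq_map]
    have := pv_map_pyGetD_range t idx (t.length - idx) (by omega)
    rw [show ((idx + (t.length - idx) : Nat) : Int) = (t.length : Int) by push_cast <;> omega] at this
    rw [this, List.take_of_length_le (by simp)]
    simp
  have l2 : (PySem.List.pyRange ((idx : Int) - 1) (-1) (-1)).foldl
      (fun acc i => acc ++ [PySem.List.pyGetD t i 0]) (t.drop idx)
      = t.drop idx ++ (t.take idx).reverse := by
    rw [PySem.List.foldl_append_singleton_eq_map]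
    congr 1
    rw [PySem.List.pyRange_neg_one_eq_reverse, List.map_reverse]
    have := pv_map_pyGetD_range t 0 idx (by omega)
    simp only [List.drop_zero, Nat.zero_add] at this
    rw [show ((-1 : Int) + 1) = ((0 : Nat) : Int) by norm_num,
        show ((idx : Int) - 1 + 1) = ((idx : Nat) : Int) by ring, this]
  rw [l1, l2, hdrop, htake]

-- A's output is sorted for pvLookLt
theorem pv_A_pairwise (cp : Int) (reqs : List Int) (hmem : cp ∈ reqs) :
    (look_scheduling_algorithm cp reqs).Pairwise (fun a b => pvLookLt cp b a = false) := by
  rw [pv_A_eq_split cp reqs hmem]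
  set t := PySem.List.sorted reqs (fun x => x) false with ht
  have hpw : t.Pairwise (· ≤ ·) := by
    simpa using PySem.List.sorted_pairwise reqs (fun x => x)
  refine List.pairwise_append.mpr ⟨?_, ?_, ?_⟩
  · refine List.Pairwise.imp_of_mem ?_ (hpw.sublist List.filter_sublist)
    intro a b ha hb hab
    have ha' : cp ≤ a := by simpa using (List.mem_filter.mp ha).2
    have hb' : cp ≤ b := by simpa using (List.mem_filter.mp hb).2
    unfold pvLookLt
    simp only [not_lt.mpr ha', not_lt.mpr hb', if_false]
    simp <;> omega
  · rw [List.pairwise_reverse]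
    refine List.Pairwise.imp_of_mem ?_ (hpw.sublist List.filter_sublist)
    intro a b ha hb hab
    have ha' : a < cp := by simpa using (List.mem_filter.mp ha).2
    have hb' : b < cp := by simpa using (List.mem_filter.mp hb).2
    unfold pvLookLt
    simp only [ha', hb', if_true]
    simp <;> omega
  · intro a ha b hb
    have ha' : cp ≤ a := by simpa using (List.mem_filter.mp ha).2
    have hb' : b < cp := by simpa using (List.mem_filter.mp (List.mem_reverse.mp hb)).2
    unfold pvLookLt
    simp only [hb', not_lt.mpr ha', if_true, if_false]
    simp <;> omega

theorem pv_A_perm (cp : Int) (reqs : List Int) (hmem : cp ∈ reqs) :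
    (look_scheduling_algorithm cp reqs).Perm reqs := by
  rw [pv_A_eq_split cp reqs hmem]
  set t := PySem.List.sorted reqs (fun x => x) false with ht
  have h1 : ((t.filter (fun r => decide (cp ≤ r)))
      ++ (t.filter (fun r => decide (r < cp))).reverse).Perm
      ((t.filter (fun r => decide (cp ≤ r))) ++ (t.filter (fun r => decide (r < cp)))) :=
    List.Perm.append_left _ (List.reverse_perm _)
  have h2 : ((t.filter (fun r => decide (cp ≤ r)))
      ++ (t.filter (fun r => decide (r < cp)))).Perm t := by
    have := List.filter_append_perm (fun r => decide (cp ≤ r)) t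
    have heq : ∀ r : Int, (!decide (cp ≤ r)) = decide (r < cp) := by
      intro r; by_cases h : cp ≤ r <;> simp [h] <;> omega
    simpa [heq] using this
  exact (h1.trans h2).trans (PySem.List.sorted_perm reqs (fun x => x) false)

theorem look_scheduling_algorithm_eq (cp : Int) (reqs : List Int) (hmem : cp ∈ reqs) :
    look_scheduling_algorithm cp reqs = look_scheduling_algorithm_alt cp reqs := by
  refine List.eq_of_perm_of_sorted ?_ (pv_A_pairwise cp reqs hmem) (pv_alt_pairwise cp reqs hmem) ?_
  · intro a b _ _ h1 h2
    exact pvLookLt_antisymm cp a b h1 h2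
  · refine (pv_A_perm cp reqs hmem).trans ?_
    unfold look_scheduling_algorithm_alt
    rw [if_pos hmem]
    exact (PySem.List.sorted2_perm reqs _ _ false).symm

-- ===== VERDICT (by name: the statement is the Claim_ definition above) =====
theorem look_scheduling_algorithm_spec : Claim_equal_look_scheduling_algorithm := by
  intro cp reqs _ hpre
  exact look_scheduling_algorithm_eq cp reqs hpre
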